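-- pv_equiv track=rewrite | github.com/adamhump/shopify-label-sorter | app.py | extract_first_product
-- ===== SOURCE A (Python) =====
-- def extract_first_product(text):
--     lines = text.split('\n')
--     product_section_started = False
--     for line in lines:
--         line = line.strip()
--         if 'ITEMS' in line:
--             product_section_started = True
--         elif product_section_started and line:
--             # The first non-empty line after "ITEMS" is the product name
--             return line.lower().strip()
--     return None  # If no product found
-- ===== SOURCE B (Python) =====
-- def extract_first_product(text):
--     # Backward pass: for each suffix of the line list keep two answers,
--     # r_seen  = result if the ITEMS marker was already seen before this suffix,
--     # r_unseen = result if it was not yet seen.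
--     r_seen = None
--     r_unseen = None
--     for raw in reversed(text.split('\n')):
--         line = raw.strip()
--         if 'ITEMS' in line:
--             r_unseen = r_seen
--         elif line:
--             r_seen = line.lower()
--     return r_unseen
-- ===== Notes on version B (the rewrite author's own statement) =====
-- stated objective: alternative
-- what changed: Replaces A's forward flag-threaded scan by a single backward (right-to-left) pass maintaining a two-state accumulator (the answer assuming the ITEMS marker was/was not already seen), returning the not-yet-seen state at the end.
import Mathlib
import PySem

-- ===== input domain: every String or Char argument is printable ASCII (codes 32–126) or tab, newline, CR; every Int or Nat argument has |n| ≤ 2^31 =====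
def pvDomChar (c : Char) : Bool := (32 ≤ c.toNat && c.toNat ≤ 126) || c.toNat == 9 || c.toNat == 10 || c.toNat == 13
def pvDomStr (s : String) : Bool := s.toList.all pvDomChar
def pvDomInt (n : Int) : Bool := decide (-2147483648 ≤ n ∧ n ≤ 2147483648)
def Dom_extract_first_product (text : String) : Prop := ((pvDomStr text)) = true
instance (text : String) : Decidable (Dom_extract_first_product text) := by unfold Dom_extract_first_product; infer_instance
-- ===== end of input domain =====

-- B replaces A's forward flag-threaded scan with a single backward pass carrying a
-- two-state accumulator (answer if the marker was / was not already seen): alternative decomposition, same cost.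

-- ===== PORT A =====
-- A's loop: for line in lines, strip; 'ITEMS' in line sets the flag; the first non-empty line after that is returned lowercased.
def pvLoopA : List String → Bool → Option String
  | [], _ => none
  | l :: ls, flag =>
    let line := PySem.Str.strip l
    if PySem.Str.isIn "ITEMS" line then pvLoopA ls true
    else if flag && !(line == "") then some (PySem.Str.strip (PySem.Str.lower line))
    else pvLoopA ls flag

def extract_first_product (text : String) : Option String :=
  pvLoopA ((PySem.Str.split? text "\n").getD []) false

-- ===== PORT B =====
-- B's step: state is (r_seen, r_unseen); an ITEMS line copies r_seen to r_unseen, a non-empty line updates r_seen.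
def pvStepB (st : Option String × Option String) (raw : String) : Option String × Option String :=
  let line := PySem.Str.strip raw
  if PySem.Str.isIn "ITEMS" line then (st.1, st.1)
  else if !(line == "") then (some (PySem.Str.lower line), st.2)
  else st

def extract_first_product_alt (text : String) : Option String :=
  (((PySem.Str.split? text "\n").getD []).reverse.foldl pvStepB (none, none)).2

-- ===== PRECONDITION & SPEC =====
def Spec_extract_first_product (text : String) (out : Option String) : Prop := out = extract_first_product_alt text
instance (text : String) (out : Option String) : Decidable (Spec_extract_first_product text out) := by unfold Spec_extract_first_product; infer_instance

-- ===== CLAIM (what is proved, stated in full; the proofs are below) =====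
def Claim_equal_extract_first_product : Prop := ∀ (text : String), Dom_extract_first_product text → Spec_extract_first_product text (extract_first_product text)

-- ===== LEMMAS AND PROOFS =====

-- lowering a character never changes whether it is whitespace
theorem pv_isspace_lowerChar (c : Char) : PySem.Chars.isspace (PySem.Chars.lowerChar c) = PySem.Chars.isspace c := by
  simp only [PySem.Chars.lowerChar, PySem.Chars.isupper]
  split_ifs with h
  · simp only [Bool.and_eq_true, decide_eq_true_eq, Char.le_def] at h
    have h1 : 65 ≤ c.toNat := h.1
    have h2 : c.toNat ≤ 90 := h.2
    have hv : (Char.ofNat (c.toNat + 32)).toNat = c.toNat + 32 := by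
      rw [Char.toNat_ofNat, if_pos]; unfold Nat.isValidChar; omega
    have hA : PySem.Chars.isspace c = false := by
      simp only [PySem.Chars.isspace, Bool.or_eq_false_iff, Bool.and_eq_false_iff,
        decide_eq_false_iff_not]
      omega
    have hB : PySem.Chars.isspace (Char.ofNat (c.toNat + 32)) = false := by
      simp only [PySem.Chars.isspace, hv, Bool.or_eq_false_iff, Bool.and_eq_false_iff,
        decide_eq_false_iff_not]
      omega
    rw [hA, hB]
  · rfl

-- strip commutes with lower
theorem pv_strip_lower (s : List Char) :
    PySem.Chars.strip (PySem.Chars.lower s) = PySem.Chars.lower (PySem.Chars.strip s) := by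
  have hp : (PySem.Chars.isspace ∘ PySem.Chars.lowerChar) = PySem.Chars.isspace :=
    funext pv_isspace_lowerChar
  simp only [PySem.Chars.strip, PySem.Chars.rstrip, PySem.Chars.lstrip, PySem.Chars.lower,
    List.dropWhile_map, hp, ← List.map_reverse]

-- strip is idempotent
theorem pv_strip_strip (s : List Char) :
    PySem.Chars.strip (PySem.Chars.strip s) = PySem.Chars.strip s := by
  unfold PySem.Chars.strip PySem.Chars.rstrip PySem.Chars.lstrip
  set p := PySem.Chars.isspace with hp
  set t := List.dropWhile p s with ht
  set r := List.dropWhile p t.reverse with hr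
  have h1 : List.dropWhile p r.reverse = r.reverse := by
    rw [List.dropWhile_eq_self_iff]
    intro hl hpe
    obtain ⟨u, hu⟩ : r <:+ t.reverse := List.dropWhile_suffix p
    have htu : t = r.reverse ++ u.reverse := by
      rw [← List.reverse_reverse t, ← hu]; simp
    have hget : t.head? = some (r.reverse[0]'hl) := by
      rw [List.head?_eq_getElem?, htu, List.getElem?_append_left hl,
        List.getElem?_eq_getElem hl]
    have hh := List.head?_dropWhile_not p s
    rw [← ht, hget] at hh
    simp only at hh
    rw [hpe] at hh
    exact Bool.noConfusion hh
  rw [h1, List.reverse_reverse, hr, List.dropWhile_idempotent]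

-- the per-line fact the two ports differ by: A returns strip(lower(strip l)), B returns lower(strip l)
theorem pv_strip_lower_strip (l : String) :
    PySem.Str.strip (PySem.Str.lower (PySem.Str.strip l)) = PySem.Str.lower (PySem.Str.strip l) := by
  apply String.toList_inj.mp
  simp only [PySem.Str.toList_strip, PySem.Str.toList_lower]
  rw [pv_strip_lower, pv_strip_strip]

-- the backward fold computes, in its two components, A's loop with the flag set and unset
theorem pv_fold_loopA (ls : List String) :
    ls.reverse.foldl pvStepB (none, none) = (pvLoopA ls true, pvLoopA ls false) := by
  rw [List.foldl_reverse]
  induction ls with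
  | nil => rfl
  | cons l ls ih =>
    rw [List.foldr_cons, ih]
    simp only [pvStepB, pvLoopA]
    by_cases hI : PySem.Chars.isIn ['I','T','E','M','S'] (PySem.Chars.strip l.toList) = true
    · simp [hI]
    · by_cases hE : PySem.Str.strip l = ""
      · simp [hE, show PySem.Chars.isIn ['I','T','E','M','S'] ([]:List Char) = false from rfl]
      · simp [hI, hE, pv_strip_lower_strip]

-- ===== VERDICT (by name: the statement is the Claim_ definition above) =====
theorem extract_first_product_spec : Claim_equal_extract_first_product := by
  intro text _
  unfold Spec_extract_first_product extract_first_product extract_first_product_alt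
  rw [pv_fold_loopA]
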